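-- pv_equiv track=rewrite | github.com/monikaglazz/Python | Python others/Get_VAT_For_Country/VAT_for_country.py | get_country_VAT
-- ===== SOURCE A (Python) =====
-- def get_country_VAT(country_list, country_index):
--     """Gets a tax value for a country.
--
--     Args:
--         country_list (list): list of str with countries
--         country_index (int): index of a county
--
--     Returns:
--         int: tax value for a country
--     """
--
--     index = 1
--     tax_value = 0
--     for country in country_list:
--         if index == country_index:
--             tax_value = country[1]
--             break
--         index += 1
--
--     return tax_value
-- ===== SOURCE B (Python) =====
-- def get_country_VAT(country_list, country_index):
--     """Gets a tax value for a country (1-based index; 0 when out of range)."""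
--     if 1 <= country_index <= len(country_list):
--         return country_list[country_index - 1][1]
--     return 0
-- ===== Notes on version B (the rewrite author's own statement) =====
-- stated objective: faster
-- what changed: Replaces the 1-based counting scan (loop with a running index and break) by a range check plus one direct positional lookup country_list[country_index-1][1].
import Mathlib
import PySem

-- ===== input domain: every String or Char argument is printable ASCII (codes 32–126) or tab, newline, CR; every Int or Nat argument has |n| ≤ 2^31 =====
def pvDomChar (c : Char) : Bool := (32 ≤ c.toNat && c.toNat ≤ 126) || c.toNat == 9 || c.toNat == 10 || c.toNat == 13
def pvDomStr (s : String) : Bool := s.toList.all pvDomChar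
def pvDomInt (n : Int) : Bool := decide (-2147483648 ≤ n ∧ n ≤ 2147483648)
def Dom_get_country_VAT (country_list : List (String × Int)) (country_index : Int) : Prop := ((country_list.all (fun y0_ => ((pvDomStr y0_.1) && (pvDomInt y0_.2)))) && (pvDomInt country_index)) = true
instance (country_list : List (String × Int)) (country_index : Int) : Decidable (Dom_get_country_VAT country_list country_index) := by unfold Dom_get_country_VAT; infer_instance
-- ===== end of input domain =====

-- B replaces A's counting scan by an O(1) range check + direct positional lookup.

-- ===== PORT A =====
-- the for-loop with running `index` and break, started at index = 1
def pvGoA : List (String × Int) → Int → Int → Int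
  | [], _, _ => 0
  | c :: rest, ci, idx => if idx = ci then c.2 else pvGoA rest ci (idx + 1)

def get_country_VAT (country_list : List (String × Int)) (country_index : Int) : Int :=
  pvGoA country_list country_index 1

-- ===== PORT B =====
def get_country_VAT_alt (country_list : List (String × Int)) (country_index : Int) : Int :=
  if 1 ≤ country_index ∧ country_index ≤ (country_list.length : Int) then
    match PySem.List.pyGet? country_list (country_index - 1) with
    | some c => c.2
    | none => 0
  else 0

-- ===== PRECONDITION & SPEC =====
def Spec_get_country_VAT (country_list : List (String × Int)) (country_index : Int) (out : Int) : Prop := out = get_country_VAT_alt country_list country_index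
instance (country_list : List (String × Int)) (country_index : Int) (out : Int) : Decidable (Spec_get_country_VAT country_list country_index out) := by unfold Spec_get_country_VAT; infer_instance

-- ===== CLAIM (what is proved, stated in full; the proofs are below) =====
def Claim_equal_get_country_VAT : Prop := ∀ (country_list : List (String × Int)) (country_index : Int), Dom_get_country_VAT country_list country_index → Spec_get_country_VAT country_list country_index (get_country_VAT country_list country_index)

-- ===== LEMMAS AND PROOFS =====
theorem pvGoA_eq (l : List (String × Int)) (ci : Int) : ∀ idx : Int,
    pvGoA l ci idx =
      if idx ≤ ci ∧ ci < idx + l.length then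
        ((l[(ci - idx).toNat]?).map Prod.snd).getD 0
      else 0 := by
  induction l with
  | nil =>
    intro idx
    simp only [pvGoA, List.length_nil]
    split_ifs with h
    · omega
    · rfl
  | cons c rest ih =>
    intro idx
    simp only [pvGoA, List.length_cons]
    by_cases h : idx = ci
    · subst h
      have h0 : (idx - idx).toNat = 0 := by omega
      rw [if_pos rfl, if_pos ⟨le_refl _, by push_cast; omega⟩, h0]
      simp
    · rw [if_neg h, ih (idx + 1)]
      split_ifs with h1 h2 h2
      · have hk : ∃ k : Nat, ci - idx = (k : Int) + 1 := ⟨(ci - idx - 1).toNat, by omega⟩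
        obtain ⟨k, hk⟩ := hk
        have : (ci - idx).toNat = k + 1 := by omega
        have : (ci - (idx + 1)).toNat = k := by omega
        simp_all
      · exfalso; push_cast at h1 h2; omega
      · exfalso; push_cast at h1 h2; omega
      · rfl

-- ===== VERDICT (by name: the statement is the Claim_ definition above) =====
theorem get_country_VAT_spec : Claim_equal_get_country_VAT := by
  intro l ci _
  show get_country_VAT l ci = get_country_VAT_alt l ci
  rw [get_country_VAT, pvGoA_eq l ci 1, get_country_VAT_alt]
  split_ifs with h1 h2 h2
  · have hget : PySem.List.pyGet? l (ci - 1) = l[(ci - 1).toNat]? :=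
      PySem.List.pyGet?_of_nonneg _ (by omega)
    rw [hget]
    cases hx : l[(ci - 1).toNat]? <;> simp
  · exfalso; omega
  · exfalso; omega
  · rfl
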